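-- pv_equiv track=rewrite | github.com/Michaeloye/DSA | leetcodeDailyChallenge/2025/september/FindMostFrequentVowelandConsonant.py | maxFreqSum
-- ===== SOURCE A (Python) =====
-- def maxFreqSum(s: str) -> int:
--     VOWELS = set(['a', 'e', 'i', 'o', 'u'])
--     vowels_map = {'-1': 0}
--     consonants_map = {'-1': 0}
--
--     for c in s:
--         if c in VOWELS:
--             vowels_map[c] = vowels_map.get(c, 0) + 1
--         else:
--             consonants_map[c] = consonants_map.get(c, 0) + 1
--
--     vow_max_freq = max(vowels_map.values())
--     con_max_freq = max(consonants_map.values())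
--
--     return vow_max_freq + con_max_freq
-- ===== SOURCE B (Python) =====
-- def maxFreqSum(s: str) -> int:
--     t = sorted(s)
--     vow = con = 0
--     i, n = 0, len(t)
--     while i < n:
--         j = i
--         while j < n and t[j] == t[i]:
--             j += 1
--         if t[i] in "aeiou":
--             vow = max(vow, j - i)
--         else:
--             con = max(con, j - i)
--         i = j
--     return vow + con
-- ===== Notes on version B (the rewrite author's own statement) =====
-- stated objective: alternative
-- what changed: Replaced the dict-counting pass and max over dict values by sort-then-scan: sort the characters and take the longest run of equal characters among vowels and among non-vowels (equal characters are adjacent after sorting, so a run length is that character's count).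
import Mathlib
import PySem

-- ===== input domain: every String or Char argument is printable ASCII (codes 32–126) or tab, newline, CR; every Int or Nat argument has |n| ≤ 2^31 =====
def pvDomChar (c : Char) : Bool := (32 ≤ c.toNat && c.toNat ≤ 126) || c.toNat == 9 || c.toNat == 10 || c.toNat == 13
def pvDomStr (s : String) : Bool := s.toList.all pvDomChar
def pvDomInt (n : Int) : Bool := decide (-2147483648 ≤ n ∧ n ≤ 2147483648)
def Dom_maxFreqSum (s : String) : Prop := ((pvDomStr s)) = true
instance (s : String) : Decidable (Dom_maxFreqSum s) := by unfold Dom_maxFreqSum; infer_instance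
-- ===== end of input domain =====

-- B replaces A's dict-counting pass (two sentinel-seeded dicts, max over their values) by
-- sort-then-scan: sort the characters and take the longest run of equal characters among
-- vowels and among non-vowels (alternative algorithm; not claimed faster).

-- ===== PORT A =====
def maxFreqSum (s : String) : Int :=
  let VOWELS : PySem.Set Char := PySem.Set.ofList ['a', 'e', 'i', 'o', 'u']
  -- the dict literals {'-1': 0}; Python dict keys are strings, a char c is the string str(c)
  let init : PySem.Dict String Int := PySem.Dict.mk [("-1", 0)]
  let st := s.toList.foldl
    (fun (st : PySem.Dict String Int × PySem.Dict String Int) c =>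
      if VOWELS.contains c then
        (st.1.insert (String.ofList [c]) (st.1.getD (String.ofList [c]) 0 + 1), st.2)
      else
        (st.1, st.2.insert (String.ofList [c]) (st.2.getD (String.ofList [c]) 0 + 1)))
    (init, init)
  -- max() over dict values: both dicts keep the '-1' sentinel, so they are nonempty and
  -- Python's max never raises; .getD 0 never fires
  (PySem.List.max? st.1.values (fun x => x)).getD 0
    + (PySem.List.max? st.2.values (fun x => x)).getD 0

-- ===== PORT B =====
-- t[i] in "aeiou"
def pvIsVowel (c : Char) : Bool := c ∈ (['a', 'e', 'i', 'o', 'u'] : List Char)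

-- the outer while loop over the sorted list: each step consumes one maximal run of equal
-- characters (the inner 'while j < n and t[j] == t[i]' scan is takeWhile/dropWhile)
def pvBLoop : List Char → Int → Int → Int
  | [], vow, con => vow + con
  | c :: t, vow, con =>
    let run : Int := 1 + (t.takeWhile (· == c)).length
    if pvIsVowel c then pvBLoop (t.dropWhile (· == c)) (max vow run) con
    else pvBLoop (t.dropWhile (· == c)) vow (max con run)
termination_by r => r.length
decreasing_by
  · exact Nat.lt_succ_of_le (List.length_dropWhile_le _ _)
  · exact Nat.lt_succ_of_le (List.length_dropWhile_le _ _)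

def maxFreqSum_alt (s : String) : Int :=
  pvBLoop (PySem.List.sorted s.toList (fun c => c.toNat) false) 0 0

-- ===== PRECONDITION & SPEC =====
def Spec_maxFreqSum (s : String) (out : Int) : Prop := out = maxFreqSum_alt s
instance (s : String) (out : Int) : Decidable (Spec_maxFreqSum s out) := by unfold Spec_maxFreqSum; infer_instance

-- ===== CLAIM (what is proved, stated in full; the proofs are below) =====
def Claim_equal_maxFreqSum : Prop := ∀ (s : String), Dom_maxFreqSum s → Spec_maxFreqSum s (maxFreqSum s)

-- ===== LEMMAS AND PROOFS =====

-- x is the maximum frequency in l over characters satisfying p (0 when none occurs)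
def IsMaxFreq (l : List Char) (p : Char → Bool) (x : Int) : Prop :=
  0 ≤ x ∧ (∀ c, p c = true → (l.count c : Int) ≤ x) ∧
    (x = 0 ∨ ∃ c ∈ l, p c = true ∧ (l.count c : Int) = x)

theorem IsMaxFreq_unique (l : List Char) (p : Char → Bool) (x y : Int)
    (hx : IsMaxFreq l p x) (hy : IsMaxFreq l p y) : x = y := by
  obtain ⟨hx0, hxub, hxw⟩ := hx
  obtain ⟨hy0, hyub, hyw⟩ := hy
  rcases hxw with hx0' | ⟨c, hcl, hcp, hcx⟩
  · rcases hyw with hy0' | ⟨c, hcl, hcp, hcy⟩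
    · rw [hx0', hy0']
    · have h1 := hxub c hcp
      have h2 : 1 ≤ l.count c := List.one_le_count_iff.mpr hcl
      omega
  · rcases hyw with hy0' | ⟨d, hdl, hdp, hdy⟩
    · have h1 := hyub c hcp
      have h2 : 1 ≤ l.count c := List.one_le_count_iff.mpr hcl
      omega
    · have h1 := hyub c hcp
      have h2 := hxub d hdp
      omega

theorem IsMaxFreq_perm (l m : List Char) (p : Char → Bool) (x : Int)
    (hperm : l.Perm m) (h : IsMaxFreq l p x) : IsMaxFreq m p x := by
  obtain ⟨h0, hub, hw⟩ := h
  refine ⟨h0, ?_, ?_⟩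
  · intro c hc
    rw [← hperm.count_eq]
    exact hub c hc
  · rcases hw with h0' | ⟨c, hcl, hcp, hcx⟩
    · exact Or.inl h0'
    · exact Or.inr ⟨c, hperm.mem_iff.mp hcl, hcp, by rw [← hperm.count_eq]; exact hcx⟩

-- ---------- A side ----------

-- the string key a char becomes in A's dicts
def pvKey (c : Char) : String := String.ofList [c]

theorem pvKey_inj : Function.Injective pvKey := by
  intro a b h
  have h2 : ([a] : List Char) = [b] := by
    simpa [pvKey] using congrArg String.toList h
  simpa using h2

theorem pvKey_ne_neg1 (c : Char) : pvKey c ≠ "-1" := by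
  intro h
  have h2 := congrArg String.toList h
  simp [pvKey] at h2

-- A's counting fold splits into two independent counting folds
theorem fold_pair (V : PySem.Set Char) :
    ∀ (l : List Char) (d1 d2 : PySem.Dict String Int),
      l.foldl
        (fun (st : PySem.Dict String Int × PySem.Dict String Int) c =>
          if V.contains c then
            (st.1.insert (String.ofList [c]) (st.1.getD (String.ofList [c]) 0 + 1), st.2)
          else
            (st.1, st.2.insert (String.ofList [c]) (st.2.getD (String.ofList [c]) 0 + 1)))
        (d1, d2)
      = (((l.filter (fun c => V.contains c)).map pvKey).foldl
            (fun d x => d.insert x (d.getD x 0 + 1)) d1,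
         ((l.filter (fun c => !V.contains c)).map pvKey).foldl
            (fun d x => d.insert x (d.getD x 0 + 1)) d2) := by
  intro l
  induction l with
  | nil => intro d1 d2; simp
  | cons c t ih =>
    intro d1 d2
    cases hc : V.contains c with
    | true =>
      have hm : c ∈ V := (PySem.Set.contains_iff V c).mp hc
      rw [List.foldl_cons, if_pos hc, ih]
      simp [hm, pvKey]
    | false =>
      have hm : c ∉ V := by simpa using hc
      rw [List.foldl_cons, if_neg (by simpa using hc), ih]
      simp [hm, pvKey]

-- the result of A's counting loop on the key stream m.map pvKey, starting from {'-1': 0}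
def pvD (m : List Char) : PySem.Dict String Int :=
  (m.map pvKey).foldl (fun d x => d.insert x (d.getD x 0 + 1)) (PySem.Dict.mk [("-1", 0)])

theorem pvD_keys (m : List Char) :
    (pvD m).keys = PySem.Set.update ["-1"] (m.map pvKey) := by
  unfold pvD
  rw [PySem.Dict.keys_foldl_insert]
  rfl

theorem pvD_nodup (m : List Char) : (pvD m).keys.Nodup := by
  unfold pvD
  exact PySem.Dict.nodup_keys_foldl_insert _ _ _ (by simp [PySem.Dict.keys_mk])

theorem pvD_getD_neg1 (m : List Char) : (pvD m).getD "-1" 0 = 0 := by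
  unfold pvD
  rw [PySem.Dict.getD_foldl_insert_add_one]
  have h1 : ("-1" : String) ∉ m.map pvKey := by
    intro hmem
    obtain ⟨c, _, hcv⟩ := List.mem_map.mp hmem
    exact pvKey_ne_neg1 c hcv
  rw [List.count_eq_zero.mpr h1]
  decide

theorem pvD_getD (m : List Char) (c : Char) :
    (pvD m).getD (pvKey c) 0 = (m.count c : Int) := by
  unfold pvD
  rw [PySem.Dict.getD_foldl_insert_add_one]
  rw [List.count_map_of_injective m pvKey pvKey_inj c]
  have h0 : (PySem.Dict.mk [("-1", (0:Int))]).getD (pvKey c) 0 = 0 := by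
    simp only [PySem.Dict.getD, PySem.Dict.get?, List.find?]
    have : (("-1" : String) == pvKey c) = false := by
      simp
      exact fun h => pvKey_ne_neg1 c h.symm
    simp [this]
  rw [h0]
  simp

theorem pvD_values_mem (m : List Char) (a : Int) :
    a ∈ (pvD m).values ↔ a = 0 ∨ ∃ c ∈ m, a = (m.count c : Int) := by
  rw [PySem.Dict.values_eq_map_keys (pvD m) (pvD_nodup m) 0, pvD_keys m]
  constructor
  · intro ha
    obtain ⟨k, hk, hka⟩ := List.mem_map.mp ha
    rcases (PySem.Set.mem_update _ _ _).mp hk with hk1 | hk2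
    · left
      simp only [List.mem_singleton] at hk1
      subst hk1
      rw [← hka]
      have := pvD_getD_neg1 m
      unfold pvD at this ⊢
      exact this.symm ▸ rfl
    · obtain ⟨c, hc, hkc⟩ := List.mem_map.mp hk2
      right
      refine ⟨c, hc, ?_⟩
      rw [← hka, ← hkc]
      have := pvD_getD m c
      unfold pvD at this ⊢
      exact this
  · intro ha
    rcases ha with ha0 | ⟨c, hc, hac⟩
    · apply List.mem_map.mpr
      refine ⟨"-1", (PySem.Set.mem_update _ _ _).mpr (Or.inl (by simp)), ?_⟩
      have := pvD_getD_neg1 m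
      unfold pvD at this ⊢
      rw [this, ha0]
    · apply List.mem_map.mpr
      refine ⟨pvKey c, (PySem.Set.mem_update _ _ _).mpr
        (Or.inr (List.mem_map.mpr ⟨c, hc, rfl⟩)), ?_⟩
      have := pvD_getD m c
      unfold pvD at this ⊢
      rw [this, hac]

theorem pvD_values_ne_nil (m : List Char) : (pvD m).values ≠ [] := by
  have h0 : (0:Int) ∈ (pvD m).values := (pvD_values_mem m 0).mpr (Or.inl rfl)
  exact List.ne_nil_of_mem h0

-- A's per-dict result is the max frequency over the filter predicate
theorem A_side (l : List Char) (p : Char → Bool) :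
    IsMaxFreq l p ((PySem.List.max? (pvD (l.filter p)).values (fun x => x)).getD 0) := by
  set m := l.filter p with hm
  have hne := pvD_values_ne_nil m
  have hsome := PySem.List.max?_eq_some_maxD (pvD m).values (fun x => x) 0 hne
  have hMmem : (PySem.List.max? (pvD m).values (fun x => x)).getD 0 ∈ (pvD m).values := by
    rw [hsome]
    exact PySem.List.maxD_mem (pvD m).values (fun x => x) 0 hne
  set M := (PySem.List.max? (pvD m).values (fun x => x)).getD 0 with hM
  have hub : ∀ a ∈ (pvD m).values, a ≤ M := by
    intro a ha
    exact PySem.List.max?_isMax hsome a ha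
  have hcount : ∀ c, p c = true → m.count c = l.count c := by
    intro c hc
    rw [hm]
    exact List.count_filter hc
  refine ⟨?_, ?_, ?_⟩
  · exact hub 0 ((pvD_values_mem m 0).mpr (Or.inl rfl))
  · intro c hc
    by_cases hcl : c ∈ l
    · have hcm : c ∈ m := by rw [hm]; exact List.mem_filter.mpr ⟨hcl, hc⟩
      have := hub _ ((pvD_values_mem m _).mpr (Or.inr ⟨c, hcm, rfl⟩))
      rw [← hcount c hc]
      exact this
    · rw [List.count_eq_zero.mpr hcl]
      simpa using hub 0 ((pvD_values_mem m 0).mpr (Or.inl rfl))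
  · rcases (pvD_values_mem m M).mp hMmem with h0 | ⟨c, hcm, hMc⟩
    · exact Or.inl h0
    · have hcf := List.mem_filter.mp (hm ▸ hcm)
      refine Or.inr ⟨c, hcf.1, hcf.2, ?_⟩
      rw [hcount c hcf.2] at hMc
      exact hMc.symm

-- ---------- B side ----------

-- the max accumulated by one branch of pvBLoop, as its own recursion
def pvMF (p : Char → Bool) : List Char → Int
  | [] => 0
  | c :: t =>
    let run : Int := 1 + (t.takeWhile (· == c)).length
    if p c then max run (pvMF p (t.dropWhile (· == c)))
    else pvMF p (t.dropWhile (· == c))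
termination_by r => r.length
decreasing_by
  · exact Nat.lt_succ_of_le (List.length_dropWhile_le _ _)
  · exact Nat.lt_succ_of_le (List.length_dropWhile_le _ _)

theorem pvMF_nonneg (p : Char → Bool) : ∀ r, 0 ≤ pvMF p r := by
  intro r
  induction r using pvMF.induct p with
  | case1 => simp [pvMF]
  | case2 c t h ih =>
    rw [pvMF, if_pos h]
    have hr : (0:Int) ≤ 1 + ((t.takeWhile (· == c)).length : Int) := by positivity
    exact le_trans hr (le_max_left _ _)
  | case3 c t h ih =>
    rw [pvMF, if_neg h]
    exact ih

theorem pvBLoop_eq : ∀ r, ∀ vow con : Int, 0 ≤ vow → 0 ≤ con → pvBLoop r vow con =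
    max vow (pvMF pvIsVowel r) + max con (pvMF (fun c => !pvIsVowel c) r) := by
  intro r
  induction r using pvMF.induct pvIsVowel with
  | case1 =>
    intro vow con hv hc
    simp only [pvBLoop, pvMF]
    rw [max_eq_left hv, max_eq_left hc]
  | case2 c t h ih =>
    intro vow con hv hc
    rw [pvBLoop, if_pos h, ih _ _ (le_trans hv (le_max_left _ _)) hc]
    rw [pvMF, if_pos h]
    rw [pvMF, if_neg (by simp [h] : ¬(!pvIsVowel c) = true)]
    rw [max_assoc]
  | case3 c t h ih =>
    intro vow con hv hc
    rw [pvBLoop, if_neg h, ih _ _ hv (le_trans hc (le_max_left _ _))]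
    rw [pvMF, if_neg h]
    rw [pvMF, if_pos (by simp [h] : (!pvIsVowel c) = true)]
    rw [max_assoc]

-- sorted-run facts: in a ≤-sorted list c :: t, the initial equal run is ALL the copies of c
theorem sorted_run (c : Char) (t : List Char)
    (hs : (c :: t).Pairwise (fun a b : Char => a.toNat ≤ b.toNat)) :
    ((c :: t).count c : Int) = 1 + ((t.takeWhile (· == c)).length : Int) ∧
    (∀ d, d ≠ c → (c :: t).count d = (t.dropWhile (· == c)).count d) ∧
    (∀ x ∈ t.dropWhile (· == c), x ≠ c) := by
  have htw : ∀ x ∈ t.takeWhile (· == c), x = c := by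
    intro x hx
    have := List.mem_takeWhile_imp hx
    simpa using this
  have hsplit : t.takeWhile (· == c) ++ t.dropWhile (· == c) = t :=
    List.takeWhile_append_dropWhile
  have hrest : ∀ x ∈ t.dropWhile (· == c), x ≠ c := by
    intro x hx
    cases hd : t.dropWhile (· == c) with
    | nil => rw [hd] at hx; simp at hx
    | cons h t' =>
      have hh : ¬(h == c) = true := by
        have := List.head?_dropWhile_not (· == c) t
        rw [hd] at this
        simpa using this
      have hhne : h ≠ c := by simpa using hh
      -- c ≤ h (h ∈ t) and h ≤ x (the rest is sorted with head h), h ≠ c ⇒ x ≠ c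
      have hct : ∀ y ∈ t, c.toNat ≤ y.toNat := (List.pairwise_cons.mp hs).1
      have hts : t.Pairwise (fun a b : Char => a.toNat ≤ b.toNat) :=
        (List.pairwise_cons.mp hs).2
      have hrs : (h :: t').Pairwise (fun a b : Char => a.toNat ≤ b.toNat) := by
        have := hts.sublist (List.dropWhile_sublist (p := (· == c)) (l := t))
        rwa [hd] at this
      have hht : h ∈ t := by
        have hmem : h ∈ t.dropWhile (· == c) := by rw [hd]; simp
        exact (List.dropWhile_sublist _).subset hmem
      have hch : c.toNat ≤ h.toNat := hct h hht
      have hchlt : c.toNat < h.toNat := by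
        rcases Nat.lt_or_ge c.toNat h.toNat with h1 | h1
        · exact h1
        · have heq : h.toNat = c.toNat := le_antisymm h1 hch
          have : h = c := by
            apply Char.ext
            unfold Char.toNat at heq
            exact UInt32.toNat_inj.mp heq
          exact absurd this hhne
      rw [hd] at hx
      rcases List.mem_cons.mp hx with hx1 | hx2
      · rw [hx1]; exact hhne
      · have hhx : h.toNat ≤ x.toNat := (List.pairwise_cons.mp hrs).1 x hx2
        intro hxc
        rw [hxc] at hhx
        omega
  have hcntsplit : ∀ d : Char, t.count d
      = (t.takeWhile (· == c)).count d + (t.dropWhile (· == c)).count d := by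
    intro d
    conv_lhs => rw [← hsplit]
    rw [List.count_append]
  refine ⟨?_, ?_, hrest⟩
  · have h1 : (t.takeWhile (· == c)).count c = (t.takeWhile (· == c)).length := by
      apply List.count_eq_length.mpr
      intro x hx
      exact ((htw x hx).symm ▸ rfl)
    have h2 : (t.dropWhile (· == c)).count c = 0 := by
      apply List.count_eq_zero.mpr
      intro hmem
      exact hrest c hmem rfl
    have h3 : (c :: t).count c = 1 + t.count c := by
      rw [List.count_cons_self]; omega
    rw [h3, hcntsplit c, h1, h2]
    push_cast
    ring
  · intro d hd
    have h1 : (t.takeWhile (· == c)).count d = 0 := by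
      apply List.count_eq_zero.mpr
      intro hmem
      exact hd (htw d hmem)
    have h3 : (c :: t).count d = t.count d := List.count_cons_of_ne hd.symm
    rw [h3, hcntsplit d, h1]
    omega

theorem pvMF_spec (p : Char → Bool) : ∀ r,
    r.Pairwise (fun a b : Char => a.toNat ≤ b.toNat) → IsMaxFreq r p (pvMF p r) := by
  intro r
  induction r using pvMF.induct p with
  | case1 =>
    intro _
    rw [pvMF]
    exact ⟨le_refl 0, fun c _ => by simp, Or.inl rfl⟩
  | case2 c t h ih =>
    intro hs
    obtain ⟨hcnt, hother, hrest⟩ := sorted_run c t hs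
    have hrs : (t.dropWhile (· == c)).Pairwise (fun a b : Char => a.toNat ≤ b.toNat) :=
      ((List.pairwise_cons.mp hs).2).sublist (List.dropWhile_sublist _)
    obtain ⟨ih0, ihub, ihw⟩ := ih hrs
    rw [pvMF, if_pos h]
    set run : Int := 1 + ((t.takeWhile (· == c)).length : Int) with hrun
    have hr1 : (1:Int) ≤ run := by rw [hrun]; omega
    refine ⟨le_trans (by omega) (le_max_left run _), ?_, ?_⟩
    · intro d hd
      by_cases hdc : d = c
      · subst hdc
        rw [hcnt]
        exact le_max_left _ _
      · rw [Int.natCast_inj.mpr (hother d hdc)]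
        exact le_trans (ihub d hd) (le_max_right _ _)
    · rcases le_total (pvMF p (t.dropWhile (· == c))) run with hle | hle
      · refine Or.inr ⟨c, List.mem_cons_self, h, ?_⟩
        rw [hcnt, max_eq_left hle]
      · rcases ihw with h0 | ⟨d, hdm, hdp, hdc⟩
        · exfalso
          rw [h0] at hle
          omega
        · have hdne : d ≠ c := hrest d hdm
          refine Or.inr ⟨d, List.mem_cons_of_mem c ((List.dropWhile_sublist _).subset hdm), hdp, ?_⟩
          rw [Int.natCast_inj.mpr (hother d hdne), hdc, max_eq_right hle]
  | case3 c t h ih =>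
    intro hs
    obtain ⟨hcnt, hother, hrest⟩ := sorted_run c t hs
    have hrs : (t.dropWhile (· == c)).Pairwise (fun a b : Char => a.toNat ≤ b.toNat) :=
      ((List.pairwise_cons.mp hs).2).sublist (List.dropWhile_sublist _)
    obtain ⟨ih0, ihub, ihw⟩ := ih hrs
    rw [pvMF, if_neg h]
    refine ⟨ih0, ?_, ?_⟩
    · intro d hd
      have hdc : d ≠ c := fun he => by rw [he] at hd; rw [hd] at h; exact h rfl
      rw [Int.natCast_inj.mpr (hother d hdc)]
      exact ihub d hd
    · rcases ihw with h0 | ⟨d, hdm, hdp, hdc⟩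
      · exact Or.inl h0
      · have hdne : d ≠ c := hrest d hdm
        exact Or.inr ⟨d, List.mem_cons_of_mem c ((List.dropWhile_sublist _).subset hdm), hdp,
          by rw [Int.natCast_inj.mpr (hother d hdne)]; exact hdc⟩

-- A's vowel-set membership test agrees with B's list membership test
theorem contains_eq_isVowel (c : Char) :
    (PySem.Set.ofList ['a', 'e', 'i', 'o', 'u'] : PySem.Set Char).contains c = pvIsVowel c := by
  have h1 : (PySem.Set.ofList ['a', 'e', 'i', 'o', 'u'] : PySem.Set Char).contains c = true ↔
      c ∈ (['a', 'e', 'i', 'o', 'u'] : List Char) := by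
    rw [PySem.Set.contains_iff]
    exact PySem.Set.mem_ofList _ _
  have h2 : pvIsVowel c = true ↔ c ∈ (['a', 'e', 'i', 'o', 'u'] : List Char) := by
    simp [pvIsVowel]
  cases hb : pvIsVowel c
  · cases hb2 : (PySem.Set.ofList ['a', 'e', 'i', 'o', 'u'] : PySem.Set Char).contains c
    · rfl
    · exact absurd (h2.mpr (h1.mp hb2)) (by rw [hb]; simp)
  · rw [h1.mpr (h2.mp hb)]

-- ===== VERDICT (by name: the statement is the Claim_ definition above) =====
theorem maxFreqSum_spec : Claim_equal_maxFreqSum := by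
  intro s _
  show maxFreqSum s = maxFreqSum_alt s
  simp only [maxFreqSum, maxFreqSum_alt]
  set V : PySem.Set Char := PySem.Set.ofList ['a', 'e', 'i', 'o', 'u'] with hV
  set l : List Char := s.toList with hl
  rw [fold_pair V l (PySem.Dict.mk [("-1", 0)]) (PySem.Dict.mk [("-1", 0)])]
  have hpred : (fun c => V.contains c) = pvIsVowel := by
    funext c
    rw [hV]
    exact contains_eq_isVowel c
  have hpred' : (fun c => !V.contains c) = (fun c => !pvIsVowel c) := by
    funext c
    rw [hV, contains_eq_isVowel c]
  -- A's two summands are max frequencies over l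
  have hA1 : IsMaxFreq l pvIsVowel
      ((PySem.List.max? (pvD (l.filter (fun c => V.contains c))).values (fun x => x)).getD 0) := by
    rw [hpred]
    exact A_side l pvIsVowel
  have hA2 : IsMaxFreq l (fun c => !pvIsVowel c)
      ((PySem.List.max? (pvD (l.filter (fun c => !V.contains c))).values (fun x => x)).getD 0) := by
    rw [hpred']
    exact A_side l (fun c => !pvIsVowel c)
  -- B's two summands are max frequencies over l as well
  set r : List Char := PySem.List.sorted l (fun c => c.toNat) false with hr
  have hperm : r.Perm l := PySem.List.sorted_perm l (fun c => c.toNat) false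
  have hsorted : r.Pairwise (fun a b : Char => a.toNat ≤ b.toNat) :=
    PySem.List.sorted_pairwise l (fun c => c.toNat)
  have hB1 : IsMaxFreq l pvIsVowel (pvMF pvIsVowel r) :=
    IsMaxFreq_perm r l pvIsVowel _ hperm (pvMF_spec pvIsVowel r hsorted)
  have hB2 : IsMaxFreq l (fun c => !pvIsVowel c) (pvMF (fun c => !pvIsVowel c) r) :=
    IsMaxFreq_perm r l _ _ hperm (pvMF_spec (fun c => !pvIsVowel c) r hsorted)
  rw [pvBLoop_eq r 0 0 le_rfl le_rfl,
      max_eq_right (pvMF_nonneg pvIsVowel r),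
      max_eq_right (pvMF_nonneg (fun c => !pvIsVowel c) r)]
  rw [show (List.foldl (fun d x => d.insert x (d.getD x 0 + 1))
        (PySem.Dict.mk [("-1", 0)]) ((l.filter (fun c => V.contains c)).map pvKey)) =
        pvD (l.filter (fun c => V.contains c)) from rfl,
      show (List.foldl (fun d x => d.insert x (d.getD x 0 + 1))
        (PySem.Dict.mk [("-1", 0)]) ((l.filter (fun c => !V.contains c)).map pvKey)) =
        pvD (l.filter (fun c => !V.contains c)) from rfl]
  rw [IsMaxFreq_unique l pvIsVowel _ _ hA1 hB1,
      IsMaxFreq_unique l (fun c => !pvIsVowel c) _ _ hA2 hB2]
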